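-- pv_equiv track=rewrite | github.com/Aesmazing/Parser | Parser.py | identify_clauses
-- ===== SOURCE A (Python) =====
-- def identify_clauses(pos_tags):
--     clauses = []
--     current_clause = []
--     for word, tag in pos_tags:
--         current_clause.append((word, tag))
--         if tag == 'VERB':
--             clauses.append(current_clause)
--             current_clause = []
--     if current_clause:
--         clauses.append(current_clause)
--     return clauses
-- ===== SOURCE B (Python) =====
-- def identify_clauses(pos_tags):
--     # Backward pass: a VERB starts a fresh clause (seen from the right),
--     # everything is built reversed and flipped once at the end.
--     rev = []
--     for word, tag in reversed(pos_tags):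
--         if tag == 'VERB' or not rev:
--             rev.append([(word, tag)])
--         else:
--             rev[-1].append((word, tag))
--     return [clause[::-1] for clause in reversed(rev)]
-- ===== Notes on version B (the rewrite author's own statement) =====
-- stated objective: alternative
-- what changed: B walks the list backwards with no current-clause buffer or final flush: a VERB (or empty accumulator) starts a new reversed clause, other tags extend the latest one, and one final pass reverses clauses and their order.
import Mathlib
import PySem

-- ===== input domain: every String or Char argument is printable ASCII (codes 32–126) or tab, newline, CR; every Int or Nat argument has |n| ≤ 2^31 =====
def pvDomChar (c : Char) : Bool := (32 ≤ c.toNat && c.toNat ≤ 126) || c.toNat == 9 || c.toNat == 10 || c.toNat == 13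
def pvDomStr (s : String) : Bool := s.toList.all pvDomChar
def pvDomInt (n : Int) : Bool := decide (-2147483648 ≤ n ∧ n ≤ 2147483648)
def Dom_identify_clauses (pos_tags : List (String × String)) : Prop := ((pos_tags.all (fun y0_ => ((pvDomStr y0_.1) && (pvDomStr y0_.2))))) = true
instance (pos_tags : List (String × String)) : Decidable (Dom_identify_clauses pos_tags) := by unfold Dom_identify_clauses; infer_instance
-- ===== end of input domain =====

-- B is an alternative O(n) decomposition: a backward pass that starts a clause at each VERB,
-- with a single final reversal, instead of A's forward pass with a current-clause buffer.

-- ===== PORT A =====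
-- one loop iteration of A: append (word, tag) to the current clause, flush it on 'VERB'
def aStep (st : List (List (String × String)) × List (String × String))
    (wt : String × String) : List (List (String × String)) × List (String × String) :=
  let current := st.2 ++ [(wt.1, wt.2)]
  if wt.2 == "VERB" then (st.1 ++ [current], []) else (st.1, current)

def identify_clauses (pos_tags : List (String × String)) : List (List (String × String)) :=
  let st := pos_tags.foldl aStep ([], [])
  if st.2.isEmpty then st.1 else st.1 ++ [st.2]

-- ===== PORT B =====
-- one iteration of B's backward loop: 'VERB' (or empty accumulator) opens a new reversed clause,
-- otherwise the latest clause (rev[-1]) is extended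
def bStep (rev : List (List (String × String))) (wt : String × String) :
    List (List (String × String)) :=
  if wt.2 == "VERB" || rev.isEmpty then rev ++ [[(wt.1, wt.2)]]
  else rev.dropLast ++ [rev.getLastD [] ++ [(wt.1, wt.2)]]

def identify_clauses_alt (pos_tags : List (String × String)) : List (List (String × String)) :=
  let rev := pos_tags.reverse.foldl bStep []
  rev.reverse.map List.reverse

-- ===== PRECONDITION & SPEC =====
def Spec_identify_clauses (pos_tags : List (String × String)) (out : List (List (String × String))) : Prop := out = identify_clauses_alt pos_tags
instance (pos_tags : List (String × String)) (out : List (List (String × String))) : Decidable (Spec_identify_clauses pos_tags out) := by unfold Spec_identify_clauses; infer_instance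

-- ===== CLAIM (what is proved, stated in full; the proofs are below) =====
def Claim_equal_identify_clauses : Prop := ∀ (pos_tags : List (String × String)), Dom_identify_clauses pos_tags → Spec_identify_clauses pos_tags (identify_clauses pos_tags)

-- ===== LEMMAS AND PROOFS =====

-- reference recursion both ports are reduced to
def refClauses : List (String × String) → List (List (String × String))
  | [] => []
  | wt :: rest =>
    if wt.2 == "VERB" then [wt] :: refClauses rest
    else match refClauses rest with
      | [] => [[wt]]
      | c :: cs => (wt :: c) :: cs

-- prepend a (possibly empty) pending clause onto a clause list
def attachCur (cur : List (String × String)) (res : List (List (String × String))) :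
    List (List (String × String)) :=
  match res with
  | [] => if cur.isEmpty then [] else [cur]
  | c :: cs => if cur.isEmpty then c :: cs else (cur ++ c) :: cs

theorem attachCur_nil (res : List (List (String × String))) : attachCur [] res = res := by
  cases res <;> simp [attachCur]

theorem attachCur_cons (cur : List (String × String)) (c : List (String × String))
    (cs : List (List (String × String))) : attachCur cur (c :: cs) = (cur ++ c) :: cs := by
  cases cur <;> simp [attachCur]

theorem afold (l : List (String × String)) :
    ∀ (cl : List (List (String × String))) (cur : List (String × String)),
    (let st := l.foldl aStep (cl, cur);
     if st.2.isEmpty then st.1 else st.1 ++ [st.2]) = cl ++ attachCur cur (refClauses l) := by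
  induction l with
  | nil =>
    intro cl cur
    cases cur <;> simp [attachCur, refClauses]
  | cons wt rest ih =>
    intro cl cur
    by_cases h : wt.2 == "VERB"
    · simp only [List.foldl_cons, aStep, h, if_pos, refClauses]
      rw [ih, attachCur_nil, attachCur_cons]
      simp
    · simp only [List.foldl_cons, aStep, h, Bool.false_eq_true, if_false, refClauses]
      rw [ih]
      cases hr : refClauses rest with
      | nil => simp [attachCur]
      | cons c cs => simp [attachCur_cons]

theorem a_eq_ref (l : List (String × String)) : identify_clauses l = refClauses l := by
  have h := afold l [] []
  simp only [attachCur_nil, List.nil_append] at h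
  simpa [identify_clauses] using h

theorem bfold (l : List (String × String)) :
    l.foldr (fun wt rev => bStep rev wt) [] = ((refClauses l).map List.reverse).reverse := by
  induction l with
  | nil => simp [refClauses]
  | cons wt rest ih =>
    simp only [List.foldr_cons, ih]
    by_cases h : wt.2 == "VERB"
    · simp [bStep, h, refClauses]
    · cases hr : refClauses rest with
      | nil => simp [bStep, h, hr, refClauses]
      | cons c cs =>
        simp only [refClauses, h, Bool.false_eq_true, if_false, hr]
        simp [bStep, h]

theorem b_eq_ref (l : List (String × String)) : identify_clauses_alt l = refClauses l := by
  simp [identify_clauses_alt, List.foldl_reverse, bfold l]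

-- ===== VERDICT (by name: the statement is the Claim_ definition above) =====
theorem identify_clauses_spec : Claim_equal_identify_clauses := by
  intro pos_tags _
  unfold Spec_identify_clauses
  rw [a_eq_ref, b_eq_ref]
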